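-- pv_equiv track=rewrite | github.com/AsimFayyazRaja/Keyword_Identifier | identify_keywords.py | already_exists
-- ===== SOURCE A (Python) =====
-- def already_exists(ngram,keywords,partial_match,sp_char=' '):
--     "Tells about an n-gram is already present in the list of projects found or not"
--     for pr in keywords:
--         pr1=[]
--         pr=pr.split(sp_char)
--         for val in pr:
--             pr1.append(val.lower())
--         if ngram.lower() in pr1 and ngram.lower() not in partial_match:
--             return True
--     return False
-- ===== SOURCE B (Python) =====
-- def already_exists(ngram, keywords, partial_match, sp_char=' '):
--     "Tells about an n-gram is already present in the list of projects found or not"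
--     words = {val.lower() for pr in keywords for val in pr.split(sp_char)}
--     w = ngram.lower()
--     return w not in partial_match and w in words
-- ===== Notes on version B (the rewrite author's own statement) =====
-- stated objective: faster
-- what changed: Replaces A's per-keyword loop (which re-lowers ngram, rebuilds a lowered word list and re-scans partial_match for every keyword) with one up-front flat set of all lowercased words plus two membership checks.
import Mathlib
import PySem

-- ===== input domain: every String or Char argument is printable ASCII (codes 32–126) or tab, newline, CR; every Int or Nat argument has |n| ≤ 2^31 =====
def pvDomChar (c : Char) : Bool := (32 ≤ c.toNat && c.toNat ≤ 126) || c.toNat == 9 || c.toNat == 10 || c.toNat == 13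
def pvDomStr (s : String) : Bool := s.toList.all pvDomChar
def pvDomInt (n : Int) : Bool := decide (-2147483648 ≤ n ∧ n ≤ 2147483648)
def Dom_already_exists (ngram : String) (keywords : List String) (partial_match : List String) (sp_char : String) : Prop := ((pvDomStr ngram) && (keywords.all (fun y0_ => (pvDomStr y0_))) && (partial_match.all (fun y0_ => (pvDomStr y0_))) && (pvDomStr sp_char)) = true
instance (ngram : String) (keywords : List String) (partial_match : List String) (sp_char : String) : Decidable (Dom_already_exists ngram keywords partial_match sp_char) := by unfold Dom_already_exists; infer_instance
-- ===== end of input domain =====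

-- B builds one flat set of all lowercased words across every keyword and answers with two membership checks,
-- replacing A's per-keyword nested loop with early return (objective: faster, measured).


-- ===== PORT A =====
-- A's outer loop over keywords, with its early return
def alreadyExistsLoopA (ngram : String) (partial_match : List String) (sp_char : String) : List String → Bool
  | [] => false
  | pr :: rest =>
      -- pr = pr.split(sp_char); sep = "" raises in Python (excluded by Pre_)
      let pr' := (PySem.Str.split? pr sp_char).getD []
      -- inner loop: pr1.append(val.lower())
      let pr1 := pr'.foldl (fun acc val => acc ++ [PySem.Str.lower val]) []
      if pr1.contains (PySem.Str.lower ngram) && !(partial_match.contains (PySem.Str.lower ngram)) then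
        true
      else
        alreadyExistsLoopA ngram partial_match sp_char rest

def already_exists (ngram : String) (keywords : List String) (partial_match : List String) (sp_char : String) : Bool :=
  alreadyExistsLoopA ngram partial_match sp_char keywords

-- ===== PORT B =====
def already_exists_alt (ngram : String) (keywords : List String) (partial_match : List String) (sp_char : String) : Bool :=
  let words : PySem.Set String :=
    PySem.Set.ofList (keywords.flatMap (fun pr => ((PySem.Str.split? pr sp_char).getD []).map PySem.Str.lower))
  let w := PySem.Str.lower ngram
  !(partial_match.contains w) && PySem.Set.contains words w

-- ===== PRECONDITION & SPEC =====
-- Pre_ excludes only inputs where Python A raises: split('') is a ValueError, hit as soon as one keyword is processed.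
def Pre_already_exists (ngram : String) (keywords : List String) (partial_match : List String) (sp_char : String) : Prop :=
  sp_char ≠ "" ∨ keywords = []
instance (ngram : String) (keywords : List String) (partial_match : List String) (sp_char : String) : Decidable (Pre_already_exists ngram keywords partial_match sp_char) := by unfold Pre_already_exists; infer_instance

def pvWitness_already_exists : String × List String × List String × String :=
  ("cat", ["big cat", "dog"], ["big"], " ")

def Spec_already_exists (ngram : String) (keywords : List String) (partial_match : List String) (sp_char : String) (out : Bool) : Prop := out = already_exists_alt ngram keywords partial_match sp_char
instance (ngram : String) (keywords : List String) (partial_match : List String) (sp_char : String) (out : Bool) : Decidable (Spec_already_exists ngram keywords partial_match sp_char out) := by unfold Spec_already_exists; infer_instance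

-- ===== CLAIM (what is proved, stated in full; the proofs are below) =====
def Claim_equal_already_exists : Prop := ∀ (ngram : String) (keywords : List String) (partial_match : List String) (sp_char : String), Dom_already_exists ngram keywords partial_match sp_char → Pre_already_exists ngram keywords partial_match sp_char → Spec_already_exists ngram keywords partial_match sp_char (already_exists ngram keywords partial_match sp_char)

-- ===== LEMMAS AND PROOFS =====

theorem foldl_append_lower (l : List String) (acc : List String) :
    l.foldl (fun acc val => acc ++ [PySem.Str.lower val]) acc = acc ++ l.map PySem.Str.lower := by
  induction l generalizing acc with
  | nil => simp
  | cons x xs ih => simp [List.foldl, ih]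

-- A's loop equals: w not in partial_match AND w appears among the lowered words of some keyword
theorem loopA_eq (ngram : String) (partial_match : List String) (sp_char : String) (keywords : List String) :
    alreadyExistsLoopA ngram partial_match sp_char keywords =
      (!(partial_match.contains (PySem.Str.lower ngram)) &&
        keywords.any (fun pr => (((PySem.Str.split? pr sp_char).getD []).map PySem.Str.lower).contains (PySem.Str.lower ngram))) := by
  induction keywords with
  | nil => simp [alreadyExistsLoopA]
  | cons pr rest ih =>
      simp only [alreadyExistsLoopA, foldl_append_lower, List.nil_append, List.any_cons, ih]
      by_cases hp : PySem.Str.lower ngram ∈ partial_match <;>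
        by_cases hc : ∃ a ∈ (PySem.Str.split? pr sp_char).getD [], PySem.Str.lower a = PySem.Str.lower ngram <;>
        simp [hp, hc]

-- ===== VERDICT (by name: the statement is the Claim_ definition above) =====
theorem already_exists_spec : Claim_equal_already_exists := by
  intro ngram keywords partial_match sp_char _ _
  unfold Spec_already_exists already_exists already_exists_alt
  rw [loopA_eq]
  have h : PySem.Set.contains
      (PySem.Set.ofList (keywords.flatMap (fun pr => ((PySem.Str.split? pr sp_char).getD []).map PySem.Str.lower)))
      (PySem.Str.lower ngram) =
      keywords.any (fun pr => (((PySem.Str.split? pr sp_char).getD []).map PySem.Str.lower).contains (PySem.Str.lower ngram)) := by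
    rw [Bool.eq_iff_iff]
    simp [PySem.Set.contains_iff, PySem.Set.mem_ofList, List.mem_flatMap, List.any_eq_true]
  simp only [h]
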